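-- pv_equiv track=rewrite | github.com/anbrog/finance-papers | .history/src/main_20251118001010.py | parse_year_input
-- ===== SOURCE A (Python) =====
-- def parse_year_input(year_input):
--     """Parse year input string into list of years
--
--     Examples:
--         "" or "all" -> None (all years)
--         "2024" -> [2024]
--         "2023-2025" -> [2023, 2024, 2025]
--         "2023,2024,2025" -> [2023, 2024, 2025]
--     """
--     if not year_input or year_input.lower() in ['all', 'a']:
--         return None  # All years
--
--     years = []
--
--     # Handle comma-separated years
--     if ',' in year_input:
--         parts = year_input.split(',')
--         for part in parts:
--             part = part.strip()
--             if '-' in part: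
--                 # Range within comma list
--                 start, end = part.split('-')
--                 years.extend(range(int(start), int(end) + 1))
--             else:
--                 years.append(int(part))
--     # Handle year range
--     elif '-' in year_input:
--         start, end = year_input.split('-')
--         years = list(range(int(start.strip()), int(end.strip()) + 1))
--     # Single year
--     else:
--         years = [int(year_input.strip())]
--
--     return years
-- ===== SOURCE B (Python) =====
-- def _years(s):
--     """Recursively peel one comma-separated token off the front of s."""
--     head, *rest = s.split(',', 1)
--     if '-' in head:
--         a, b = head.split('-', 1)
--         ys = list(range(int(a), int(b) + 1))
--     else:
--         ys = [int(head)]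
--     return ys + _years(rest[0]) if rest else ys
--
--
-- def parse_year_input(year_input):
--     """Parse year input string into list of years (None = all years)."""
--     if not year_input or year_input.lower() in ('all', 'a'):
--         return None
--     return _years(year_input)
-- ===== Notes on version B (the rewrite author's own statement) =====
-- stated objective: alternative
-- what changed: Replaces A's staged parse (full split(',') into a list, then an iterative for-loop with append/extend and a separate three-way branch for comma-free input) by a recursive descent that peels one token at a time off the front with split(',', 1)/split('-', 1) and concatenates the recursive result, with no pre-materialised parts list and no comma/range/single case split at the top level.
import Mathlib
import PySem

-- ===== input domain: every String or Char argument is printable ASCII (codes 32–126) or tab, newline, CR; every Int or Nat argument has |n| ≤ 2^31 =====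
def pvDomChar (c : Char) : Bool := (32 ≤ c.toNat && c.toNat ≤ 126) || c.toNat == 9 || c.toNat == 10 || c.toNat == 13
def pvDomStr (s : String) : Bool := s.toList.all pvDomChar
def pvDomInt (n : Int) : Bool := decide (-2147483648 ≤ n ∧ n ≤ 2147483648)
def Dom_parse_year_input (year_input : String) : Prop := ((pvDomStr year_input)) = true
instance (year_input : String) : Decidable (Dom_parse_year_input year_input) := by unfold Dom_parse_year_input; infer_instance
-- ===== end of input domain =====

-- B replaces A's staged split-then-loop parse by a recursive descent that peels one
-- comma token at a time with split(',', 1) (objective: alternative decomposition).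
-- Pre_ excludes exactly the inputs on which A raises a ValueError.

-- shared primitive wrappers (int(s), s.split(sep), s.split(sep, 1) for nonempty literal sep)
def pvInt (s : String) : Int := (PySem.Int.ofStr? s).getD 0
def pvSplit (s sep : String) : List String := (PySem.Str.split? s sep).getD []
def pvSplitMax (s sep : String) (m : Int) : List String := (PySem.Str.splitMax? s sep m).getD []

-- ===== PORT A =====
def parse_year_input (year_input : String) : Option (List Int) :=
  if year_input = "" ∨ PySem.Str.lower year_input = "all" ∨ PySem.Str.lower year_input = "a" then
    none
  else if PySem.Str.isIn "," year_input = true then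
    -- years = []; for part in parts: … append/extend
    some ((pvSplit year_input ",").foldl (fun years part =>
      let p := PySem.Str.strip part
      if PySem.Str.isIn "-" p = true then
        years ++ PySem.List.pyRange (pvInt ((pvSplit p "-").getD 0 ""))
                                    (pvInt ((pvSplit p "-").getD 1 "") + 1) 1
      else
        years ++ [pvInt p]) [])
  else if PySem.Str.isIn "-" year_input = true then
    some (PySem.List.pyRange
            (pvInt (PySem.Str.strip ((pvSplit year_input "-").getD 0 "")))
            (pvInt (PySem.Str.strip ((pvSplit year_input "-").getD 1 "")) + 1) 1)
  else
    some [pvInt (PySem.Str.strip year_input)]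

-- ===== PORT B =====
-- split at the FIRST occurrence of c (what s.split(c, 1) computes): [before, after],
-- or [l] when c does not occur; used only to prove yearsRec's termination and later facts
def part1 (c : Char) : List Char → List (List Char)
  | [] => [[]]
  | a :: rest => if a = c then [[], rest] else (part1 c rest).modifyHead (a :: ·)

lemma go_zero (c : Char) (fuel : Nat) (l cur : List Char) (acc : List (List Char)) :
    PySem.Chars.splitOnMax.go [c] fuel 0 l cur acc = ((cur.reverse ++ l) :: acc).reverse := by
  cases fuel with
  | zero => simp [PySem.Chars.splitOnMax.go]
  | succ f => cases l <;> simp [PySem.Chars.splitOnMax.go]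

lemma isPrefixOf_single' (c a : Char) (rest : List Char) :
    [c].isPrefixOf (a :: rest) = (c == a) := by
  simp only [List.isPrefixOf]
  cases h : (c == a) <;> simp

lemma go_one (c : Char) (l : List Char) : ∀ (fuel : Nat) (cur : List Char)
    (acc : List (List Char)), l.length ≤ fuel →
    PySem.Chars.splitOnMax.go [c] fuel 1 l cur acc
      = acc.reverse ++ (part1 c l).modifyHead (cur.reverse ++ ·) := by
  induction l with
  | nil =>
    intro fuel cur acc _
    cases fuel <;> simp [PySem.Chars.splitOnMax.go, part1]
  | cons a rest ih =>
    intro fuel cur acc h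
    cases fuel with
    | zero => simp at h
    | succ f =>
      rw [PySem.Chars.splitOnMax.go, if_neg (by omega), isPrefixOf_single']
      have hlen : rest.length ≤ f := by simpa using h
      by_cases hac : a = c
      · rw [if_pos (by simp [hac])]
        show PySem.Chars.splitOnMax.go [c] f 0 ((a :: rest).drop [c].length) [] (cur.reverse :: acc) = _
        rw [show ((a :: rest).drop [c].length) = rest from rfl, go_zero]
        simp [part1, hac]
      · rw [if_neg (by simpa using Ne.symm hac)]
        rw [ih f (a :: cur) acc hlen]
        cases hp : part1 c rest with
        | nil => simp [part1, hac, hp]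
        | cons x xs => simp [part1, hac, hp]

lemma pvSplitMax_toList (s : String) (c : Char) (sep : String) (h : sep.toList = [c]) :
    (pvSplitMax s sep 1).map String.toList = part1 c s.toList := by
  have hm := PySem.Str.splitMax?_map s sep 1
  rw [h] at hm
  rw [show PySem.Chars.splitMax? s.toList [c] 1
    = some (PySem.Chars.splitOnMax s.toList [c] 1) from by simp [PySem.Chars.splitMax?]] at hm
  cases hv : PySem.Str.splitMax? s sep 1 with
  | none => rw [hv] at hm; simp at hm
  | some v =>
    rw [hv] at hm
    simp only [Option.map_some, Option.some.injEq] at hm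
    rw [pvSplitMax, hv, Option.getD_some, hm, PySem.Chars.splitOnMax,
      if_neg (by omega), show (1 : Int).toNat = 1 from rfl,
      go_one c s.toList (s.toList.length + 1) [] [] (by omega)]
    cases hp : part1 c s.toList <;> simp

lemma part1_two (c : Char) (l : List Char) : ∀ (b a : List Char), part1 c l = [b, a] →
    l = b ++ c :: a ∧ c ∉ b := by
  induction l with
  | nil => intro b a h; simp [part1] at h
  | cons x rest ih =>
    intro b a h
    by_cases hxc : x = c
    · rw [part1, if_pos hxc] at h
      obtain ⟨rfl, rfl⟩ : ([] : List Char) = b ∧ rest = a := by simpa using h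
      simp [hxc]
    · rw [part1, if_neg hxc] at h
      cases hp : part1 c rest with
      | nil => rw [hp] at h; simp at h
      | cons y ys =>
        rw [hp, List.modifyHead_cons] at h
        injection h with h1 h2
        obtain ⟨hl, hnb⟩ := ih y a (by rw [hp, h2])
        constructor
        · rw [← h1, hl]; rfl
        · rw [← h1]
          intro hc
          rcases List.mem_cons.mp hc with rfl | hc
          · exact hxc rfl
          · exact hnb hc

-- termination measure for yearsRec: the tail of split(',', 1) is strictly shorter
lemma tail_lt (s : String) (h : (pvSplitMax s "," 1).length = 2) :
    ((pvSplitMax s "," 1).getD 1 "").toList.length < s.toList.length := by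
  obtain ⟨p0, rest, hp⟩ := List.exists_cons_of_ne_nil
    (show pvSplitMax s "," 1 ≠ [] from by intro hn; rw [hn] at h; simp at h)
  obtain ⟨p1, rest2, hp1⟩ : ∃ p1 rest2, rest = p1 :: rest2 := by
    cases rest with
    | nil => rw [hp] at h; simp at h
    | cons x xs => exact ⟨x, xs, rfl⟩
  have hr2 : rest2 = [] := by rw [hp, hp1] at h; simpa using h
  subst hp1 hr2
  have hm : part1 ',' s.toList = [p0.toList, p1.toList] := by
    rw [← pvSplitMax_toList s ',' "," rfl, hp]; rfl
  obtain ⟨hl, _⟩ := part1_two ',' s.toList p0.toList p1.toList hm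
  rw [hp, hl]; simp; omega

-- years denoted by one comma-free token (Source B's inlined head handling)
def pvExpand1 (token : String) : List Int :=
  if PySem.Str.isIn "-" token = true then
    PySem.List.pyRange (pvInt ((pvSplitMax token "-" 1).getD 0 ""))
                       (pvInt ((pvSplitMax token "-" 1).getD 1 "") + 1) 1
  else
    [pvInt token]

-- Source B's _years: peel one token off the front with split(',', 1) and recurse on the tail
def yearsRec (s : String) : List Int :=
  if h : (pvSplitMax s "," 1).length = 2 then
    pvExpand1 ((pvSplitMax s "," 1).getD 0 "") ++ yearsRec ((pvSplitMax s "," 1).getD 1 "")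
  else
    pvExpand1 ((pvSplitMax s "," 1).getD 0 "")
termination_by s.toList.length
decreasing_by exact tail_lt s h

def parse_year_input_alt (year_input : String) : Option (List Int) :=
  if year_input = "" ∨ PySem.Str.lower year_input = "all" ∨ PySem.Str.lower year_input = "a" then
    none
  else
    some (yearsRec year_input)

-- ===== PRECONDITION & SPEC =====
-- Pre_ excludes exactly the inputs on which A raises a ValueError (a comma part whose
-- '-'-split does not have exactly two int()-parsable pieces, or a non-range part that
-- int() cannot parse); it admits every input on which A returns.
def Pre_parse_year_input (year_input : String) : Prop :=
  year_input = "" ∨ PySem.Str.lower year_input = "all" ∨ PySem.Str.lower year_input = "a" ∨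
  ∀ part ∈ pvSplit year_input ",",
    if PySem.Str.isIn "-" part = true then
      (pvSplit part "-").length = 2 ∧
      (PySem.Int.ofStr? ((pvSplit part "-").getD 0 "")).isSome = true ∧
      (PySem.Int.ofStr? ((pvSplit part "-").getD 1 "")).isSome = true
    else
      (PySem.Int.ofStr? part).isSome = true
instance (year_input : String) : Decidable (Pre_parse_year_input year_input) := by
  unfold Pre_parse_year_input; infer_instance

def pvWitness_parse_year_input : String := "2023-2025, 2030"

def Spec_parse_year_input (year_input : String) (out : Option (List Int)) : Prop :=
  out = parse_year_input_alt year_input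
instance (year_input : String) (out : Option (List Int)) : Decidable (Spec_parse_year_input year_input out) := by
  unfold Spec_parse_year_input; infer_instance

-- ===== CLAIM (what is proved, stated in full; the proofs are below) =====
def Claim_equal_parse_year_input : Prop :=
  ∀ (year_input : String), Dom_parse_year_input year_input →
    Pre_parse_year_input year_input →
    Spec_parse_year_input year_input (parse_year_input year_input)

-- ===== LEMMAS AND PROOFS =====

def mySplit (c : Char) : List Char → List Char → List (List Char) → List (List Char)
  | [], cur, acc => (cur.reverse :: acc).reverse
  | a :: rest, cur, acc =>
    if a = c then mySplit c rest [] (cur.reverse :: acc) else mySplit c rest (a :: cur) acc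

lemma go_eq_mySplit (c : Char) (l : List Char) : ∀ (fuel : Nat) (cur : List Char)
    (acc : List (List Char)), l.length ≤ fuel →
    PySem.Chars.splitOn.go [c] fuel l cur acc = mySplit c l cur acc := by
  induction l with
  | nil =>
    intro fuel cur acc _
    cases fuel <;> simp [PySem.Chars.splitOn.go, mySplit]
  | cons a rest ih =>
    intro fuel cur acc h
    cases fuel with
    | zero => simp at h
    | succ f =>
      rw [PySem.Chars.splitOn.go, isPrefixOf_single']
      have hlen : rest.length ≤ f := by simpa using h
      by_cases hac : a = c
      · rw [if_pos (by simp [hac])]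
        show PySem.Chars.splitOn.go [c] f ((a :: rest).drop [c].length) [] (cur.reverse :: acc) = _
        simp only [List.length_cons, List.length_nil, List.drop_succ_cons, List.drop_zero]
        rw [ih f [] (cur.reverse :: acc) hlen]
        simp [mySplit, hac]
      · rw [if_neg (by simpa using Ne.symm hac)]
        rw [ih f (a :: cur) acc hlen]
        simp [mySplit, hac]

def split1 (c : Char) (l : List Char) : List (List Char) := mySplit c l [] []

lemma splitOn_eq_split1 (c : Char) (l : List Char) :
    PySem.Chars.splitOn l [c] = split1 c l := by
  rw [PySem.Chars.splitOn, go_eq_mySplit c l (l.length + 1) [] [] (by omega)]; rfl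

lemma mySplit_ne_nil (c : Char) (l : List Char) : ∀ (cur : List Char) (acc : List (List Char)),
    mySplit c l cur acc ≠ [] := by
  induction l with
  | nil => intro cur acc; simp [mySplit]
  | cons a rest ih =>
    intro cur acc
    by_cases hac : a = c <;> simp only [mySplit, if_pos, hac] <;> apply ih

lemma split1_ne_nil (c : Char) (l : List Char) : split1 c l ≠ [] := mySplit_ne_nil c l [] []

lemma mySplit_acc (c : Char) (l : List Char) : ∀ (cur : List Char) (acc : List (List Char)),
    mySplit c l cur acc = acc.reverse ++ List.modifyHead (fun h => cur.reverse ++ h) (split1 c l) := by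
  induction l with
  | nil => intro cur acc; simp [mySplit, split1]
  | cons a rest ih =>
    intro cur acc
    obtain ⟨h0, t0, hsp⟩ : ∃ h0 t0, split1 c rest = h0 :: t0 := by
      cases h : split1 c rest with
      | nil => exact absurd h (split1_ne_nil c rest)
      | cons x xs => exact ⟨x, xs, rfl⟩
    by_cases hac : a = c
    · have lhs : mySplit c (a :: rest) cur acc = mySplit c rest [] (cur.reverse :: acc) := by
        simp [mySplit, hac]
      have rhs : split1 c (a :: rest) = mySplit c rest [] [[]] := by
        simp [split1, mySplit, hac]
      rw [lhs, rhs, ih [] (cur.reverse :: acc), ih [] [[]], hsp]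
      simp
    · have lhs : mySplit c (a :: rest) cur acc = mySplit c rest (a :: cur) acc := by
        simp [mySplit, hac]
      have rhs : split1 c (a :: rest) = mySplit c rest [a] [] := by
        simp [split1, mySplit, hac]
      rw [lhs, rhs, ih (a :: cur) acc, ih [a] [], hsp]
      simp

lemma split1_cons (c a : Char) (l : List Char) :
    split1 c (a :: l) = if a = c then [] :: split1 c l else List.modifyHead (a :: ·) (split1 c l) := by
  obtain ⟨h0, t0, hsp⟩ : ∃ h0 t0, split1 c l = h0 :: t0 := by
    cases h : split1 c l with
    | nil => exact absurd h (split1_ne_nil c l)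
    | cons x xs => exact ⟨x, xs, rfl⟩
  by_cases hac : a = c
  · have : split1 c (a :: l) = mySplit c l [] [[]] := by simp [split1, mySplit, hac]
    rw [this, mySplit_acc, hsp, if_pos hac]
    simp
  · have : split1 c (a :: l) = mySplit c l [a] [] := by simp [split1, mySplit, hac]
    rw [this, mySplit_acc, hsp, if_neg hac]
    simp

def modLast {α : Type} (f : α → α) (l : List α) : List α := (l.reverse.modifyHead f).reverse

lemma modLast_cons {α : Type} (f : α → α) (x : α) (l : List α) (h : l ≠ []) :
    modLast f (x :: l) = x :: modLast f l := by
  obtain ⟨y, ys, rfl⟩ := List.exists_cons_of_ne_nil h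
  unfold modLast
  rw [List.reverse_cons]
  obtain ⟨z, zs, hz⟩ := List.exists_cons_of_ne_nil (l := (y :: ys).reverse) (by simp)
  rw [hz]
  simp

lemma modLast_singleton {α : Type} (f : α → α) (x : α) : modLast f [x] = [f x] := rfl

lemma modifyHead_modLast (a : Char) (w : List Char) (l : List (List Char)) :
    List.modifyHead (a :: ·) (modLast (· ++ w) l) = modLast (· ++ w) (List.modifyHead (a :: ·) l) := by
  cases l with
  | nil => rfl
  | cons h t =>
    cases t with
    | nil => simp [modLast_singleton]
    | cons y ys =>
      rw [modLast_cons (· ++ w) h (y :: ys) (by simp), List.modifyHead_cons, List.modifyHead_cons,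
        modLast_cons (· ++ w) (a :: h) (y :: ys) (by simp)]

lemma split1_no_occ (c : Char) (l : List Char) (h : c ∉ l) : split1 c l = [l] := by
  induction l with
  | nil => rfl
  | cons a rest ih =>
    rw [split1_cons, if_neg (by simp at h; exact Ne.symm h.1), ih (by simp at h; exact h.2)]
    rfl

lemma split1_prefix (c : Char) (w l : List Char) (h : c ∉ w) :
    split1 c (w ++ l) = List.modifyHead (w ++ ·) (split1 c l) := by
  induction w with
  | nil =>
    cases hs : split1 c l with
    | nil => exact absurd hs (split1_ne_nil c l)
    | cons x xs => simpa using hs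
  | cons a w ih =>
    simp only [List.cons_append]
    rw [split1_cons, if_neg (by simp at h; exact Ne.symm h.1), ih (by simp at h; exact h.2)]
    cases hs : split1 c l with
    | nil => exact absurd hs (split1_ne_nil c l)
    | cons x xs => simp

lemma split1_suffix (c : Char) (w l : List Char) (h : c ∉ w) :
    split1 c (l ++ w) = modLast (· ++ w) (split1 c l) := by
  induction l with
  | nil =>
    rw [List.nil_append, split1_no_occ c w h, show split1 c [] = [[]] from rfl, modLast_singleton]
    simp
  | cons a rest ih =>
    simp only [List.cons_append]
    rw [split1_cons, split1_cons, ih]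
    by_cases hac : a = c
    · rw [if_pos hac, if_pos hac, modLast_cons _ _ _ (split1_ne_nil c rest)]
    · rw [if_neg hac, if_neg hac, modifyHead_modLast]

lemma mem_split1 (c : Char) (l : List Char) : ∀ x ∈ split1 c l, ∀ d ∈ x, d ∈ l := by
  induction l with
  | nil =>
    intro x hx
    have : x = [] := by simpa [split1, mySplit] using hx
    simp [this]
  | cons a rest ih =>
    intro x hx d hd
    rw [split1_cons] at hx
    by_cases hac : a = c
    · rw [if_pos hac] at hx
      rcases List.mem_cons.mp hx with rfl | hx
      · simp at hd
      · exact List.mem_cons_of_mem a (ih x hx d hd)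
    · rw [if_neg hac] at hx
      cases hs : split1 c rest with
      | nil => exact absurd hs (split1_ne_nil c rest)
      | cons h0 t0 =>
        rw [hs] at hx
        rcases List.mem_cons.mp hx with rfl | hx
        · rcases List.mem_cons.mp hd with rfl | hd
          · exact List.mem_cons_self
          · exact List.mem_cons_of_mem a (ih h0 (hs ▸ List.mem_cons_self) d hd)
        · exact List.mem_cons_of_mem a (ih x (hs ▸ List.mem_cons_of_mem h0 hx) d hd)

lemma isIn_single (c : Char) (s : List Char) : PySem.Chars.isIn [c] s = true ↔ c ∈ s := by
  have h := PySem.Chars.isIn_eq_false_iff [c] s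
  rw [List.singleton_infix_iff] at h
  cases hb : PySem.Chars.isIn [c] s
  · simp only [hb] at h
    simp only [Bool.false_eq_true, false_iff]
    simpa using h.mp trivial
  · simp only [hb] at h
    simp only [true_iff]
    by_contra hc
    exact (by simp : ¬(true = false)) (h.mpr hc)

lemma char_eq_of_toNat (c d : Char) (h : c.toNat = d.toNat) : c = d :=
  Char.ext (UInt32.toNat_inj.mp h)

lemma dom_space (c : Char) (hd : pvDomChar c = true) (hs : PySem.Chars.isspace c = true) :
    PySem.Int.isIntSpace c = true ∧ c ≠ '-' ∧ c ≠ ',' := by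
  simp only [pvDomChar, Bool.or_eq_true, Bool.and_eq_true, decide_eq_true_eq, beq_iff_eq] at hd
  simp only [PySem.Chars.isspace, Bool.or_eq_true, Bool.and_eq_true, decide_eq_true_eq] at hs
  have hn : c.toNat = 32 ∨ c.toNat = 9 ∨ c.toNat = 10 ∨ c.toNat = 13 := by omega
  rcases hn with h | h | h | h
  · have hc := char_eq_of_toNat c ' ' (by rw [h]; rfl)
    subst hc; decide
  · have hc := char_eq_of_toNat c '\t' (by rw [h]; rfl)
    subst hc; decide
  · have hc := char_eq_of_toNat c '\n' (by rw [h]; rfl)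
    subst hc; decide
  · have hc := char_eq_of_toNat c '\x0d' (by rw [h]; rfl)
    subst hc; decide

lemma strip_decomp (s : List Char) :
    ∃ w1 w2, s = w1 ++ PySem.Chars.strip s ++ w2 ∧
      (∀ x ∈ w1, PySem.Chars.isspace x = true) ∧ (∀ x ∈ w2, PySem.Chars.isspace x = true) := by
  refine ⟨List.takeWhile PySem.Chars.isspace s,
    (List.takeWhile PySem.Chars.isspace (List.dropWhile PySem.Chars.isspace s).reverse).reverse,
    ?_, fun x hx => List.mem_takeWhile_imp hx, fun x hx => List.mem_takeWhile_imp (by simpa using hx)⟩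
  simp only [PySem.Chars.strip, PySem.Chars.lstrip, PySem.Chars.rstrip]
  conv_lhs => rw [← List.takeWhile_append_dropWhile (p := PySem.Chars.isspace) (l := s)]
  rw [List.append_assoc]
  congr 1
  conv_lhs => rw [show List.dropWhile PySem.Chars.isspace s
    = (List.dropWhile PySem.Chars.isspace s).reverse.reverse by simp]
  conv_lhs => rw [← List.takeWhile_append_dropWhile (p := PySem.Chars.isspace)
    (l := (List.dropWhile PySem.Chars.isspace s).reverse)]
  rw [List.reverse_append]

lemma ofChars_ws_left (w l : List Char) (h : ∀ x ∈ w, PySem.Int.isIntSpace x = true) :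
    PySem.Int.ofChars? (w ++ l) = PySem.Int.ofChars? l := by
  simp only [PySem.Int.ofChars?]
  rw [List.dropWhile_append, if_pos (by simpa [List.dropWhile_eq_nil_iff] using h)]

lemma ofChars_ws_right (w l : List Char) (h : ∀ x ∈ w, PySem.Int.isIntSpace x = true) :
    PySem.Int.ofChars? (l ++ w) = PySem.Int.ofChars? l := by
  simp only [PySem.Int.ofChars?]
  rw [List.dropWhile_append]
  by_cases he : (List.dropWhile PySem.Int.isIntSpace l).isEmpty = true
  · rw [if_pos he]
    rw [show List.dropWhile PySem.Int.isIntSpace w = [] by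
      simpa [List.dropWhile_eq_nil_iff] using h]
    rw [show List.dropWhile PySem.Int.isIntSpace l = [] from by simpa using he]
  · rw [if_neg he, List.reverse_append, List.dropWhile_append,
      if_pos (by simp [List.dropWhile_eq_nil_iff]; intro x hx; exact h x (by simpa using hx))]

lemma ofChars_strip (s : List Char) (hd : ∀ c ∈ s, pvDomChar c = true) :
    PySem.Int.ofChars? (PySem.Chars.strip s) = PySem.Int.ofChars? s := by
  obtain ⟨w1, w2, hsw, hw1, hw2⟩ := strip_decomp s
  have hmem : ∀ x, x ∈ w1 ∨ x ∈ w2 → x ∈ s := by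
    intro x hx
    rw [hsw]
    rcases hx with hx | hx
    · exact List.mem_append.mpr (Or.inl (List.mem_append.mpr (Or.inl hx)))
    · exact List.mem_append.mpr (Or.inr hx)
  have h1 : ∀ x ∈ w1, PySem.Int.isIntSpace x = true := fun x hx =>
    (dom_space x (hd x (hmem x (Or.inl hx))) (hw1 x hx)).1
  have h2 : ∀ x ∈ w2, PySem.Int.isIntSpace x = true := fun x hx =>
    (dom_space x (hd x (hmem x (Or.inr hx))) (hw2 x hx)).1
  conv_rhs => rw [hsw]
  rw [List.append_assoc, ofChars_ws_left w1 _ h1, ofChars_ws_right w2 _ h2]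

lemma toList_getD (L : List String) (i : Nat) :
    (L.getD i "").toList = (L.map String.toList).getD i [] := by
  simp only [List.getD, List.getElem?_map]
  cases L[i]? <;> rfl

lemma pvSplit_toList (s : String) (c : Char) (sep : String) (h : sep.toList = [c]) :
    (pvSplit s sep).map String.toList = split1 c s.toList := by
  have hm := PySem.Str.split?_map s sep
  rw [h] at hm
  rw [show PySem.Chars.split? s.toList [c]
    = some (PySem.Chars.splitOn s.toList [c]) from by simp [PySem.Chars.split?]] at hm
  cases hv : PySem.Str.split? s sep with
  | none => rw [hv] at hm; simp at hm
  | some v =>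
    rw [hv] at hm
    simp only [Option.map_some, Option.some.injEq] at hm
    rw [pvSplit, hv, Option.getD_some, hm, splitOn_eq_split1]

lemma pvInt_strip (p : String) (hd : ∀ c ∈ p.toList, pvDomChar c = true) :
    pvInt (PySem.Str.strip p) = pvInt p := by
  rw [pvInt, pvInt, PySem.Int.ofStr?.eq_1, PySem.Int.ofStr?.eq_1, PySem.Str.toList_strip,
    ofChars_strip p.toList hd]

lemma isIn_strip (p : String) (hd : ∀ c ∈ p.toList, pvDomChar c = true) :
    PySem.Str.isIn "-" (PySem.Str.strip p) = PySem.Str.isIn "-" p := by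
  have h1 : PySem.Str.isIn "-" (PySem.Str.strip p)
      = PySem.Chars.isIn ['-'] (PySem.Chars.strip p.toList) := by
    rw [PySem.Str.isIn, PySem.Str.toList_strip]; rfl
  have h2 : PySem.Str.isIn "-" p = PySem.Chars.isIn ['-'] p.toList := by
    rw [PySem.Str.isIn]; rfl
  rw [h1, h2]
  obtain ⟨w1, w2, hsw, hw1, hw2⟩ := strip_decomp p.toList
  cases hb : PySem.Chars.isIn ['-'] p.toList
  · cases hb2 : PySem.Chars.isIn ['-'] (PySem.Chars.strip p.toList)
    · rfl
    · exfalso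
      have hmem := (isIn_single '-' _).mp hb2
      have : ('-' : Char) ∈ p.toList := by
        rw [hsw]; exact List.mem_append.mpr (Or.inl (List.mem_append.mpr (Or.inr hmem)))
      rw [(isIn_single '-' _).mpr this] at hb
      simp at hb
  · have hmem := (isIn_single '-' _).mp hb
    have hw1' : ('-' : Char) ∉ w1 := fun hx =>
      (dom_space '-' (hd _ (by rw [hsw]; exact List.mem_append.mpr (Or.inl (List.mem_append.mpr (Or.inl hx))))) (hw1 _ hx)).2.1 rfl
    have hw2' : ('-' : Char) ∉ w2 := fun hx =>
      (dom_space '-' (hd _ (by rw [hsw]; exact List.mem_append.mpr (Or.inr hx))) (hw2 _ hx)).2.1 rfl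
    have : ('-' : Char) ∈ PySem.Chars.strip p.toList := by
      rw [hsw] at hmem
      rcases List.mem_append.mp hmem with hx | hx
      · rcases List.mem_append.mp hx with hx | hx
        · exact absurd hx hw1'
        · exact hx
      · exact absurd hx hw2'
    exact (isIn_single '-' _).mpr this

lemma modLast_pair (w q0 q1 : List Char) :
    modLast (· ++ w) [q0, q1] = [q0, q1 ++ w] := rfl

lemma split_strip_pair (p : List Char) (hd : ∀ c ∈ p, pvDomChar c = true)
    (hlen : (split1 '-' p).length = 2) :
    ∃ q0 q1 u v, split1 '-' (PySem.Chars.strip p) = [q0, q1] ∧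
      split1 '-' p = [u ++ q0, q1 ++ v] ∧
      (∀ x ∈ u, PySem.Int.isIntSpace x = true) ∧ (∀ x ∈ v, PySem.Int.isIntSpace x = true) := by
  obtain ⟨w1, w2, hsw, hw1, hw2⟩ := strip_decomp p
  have hmem : ∀ x, x ∈ w1 ∨ x ∈ w2 → x ∈ p := by
    intro x hx
    rw [hsw]
    rcases hx with hx | hx
    · exact List.mem_append.mpr (Or.inl (List.mem_append.mpr (Or.inl hx)))
    · exact List.mem_append.mpr (Or.inr hx)
  have hsp1 : ∀ x ∈ w1, PySem.Int.isIntSpace x = true ∧ x ≠ '-' := fun x hx =>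
    ⟨(dom_space x (hd x (hmem x (Or.inl hx))) (hw1 x hx)).1,
     (dom_space x (hd x (hmem x (Or.inl hx))) (hw1 x hx)).2.1⟩
  have hsp2 : ∀ x ∈ w2, PySem.Int.isIntSpace x = true ∧ x ≠ '-' := fun x hx =>
    ⟨(dom_space x (hd x (hmem x (Or.inr hx))) (hw2 x hx)).1,
     (dom_space x (hd x (hmem x (Or.inr hx))) (hw2 x hx)).2.1⟩
  have hno1 : ('-' : Char) ∉ w1 := fun hx => (hsp1 '-' hx).2 rfl
  have hno2 : ('-' : Char) ∉ w2 := fun hx => (hsp2 '-' hx).2 rfl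
  have hkey : split1 '-' p
      = List.modifyHead (w1 ++ ·) (modLast (· ++ w2) (split1 '-' (PySem.Chars.strip p))) := by
    conv_lhs => rw [hsw, List.append_assoc]
    rw [split1_prefix '-' w1 _ hno1, split1_suffix '-' w2 _ hno2]
  have hlen' : (split1 '-' (PySem.Chars.strip p)).length = 2 := by
    rw [hkey] at hlen
    simpa [modLast] using hlen
  obtain ⟨q0, rest, hq⟩ := List.exists_cons_of_ne_nil (split1_ne_nil '-' (PySem.Chars.strip p))
  obtain ⟨q1, rest2, hq1⟩ : ∃ q1 rest2, rest = q1 :: rest2 := by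
    cases rest with
    | nil => rw [hq] at hlen'; simp at hlen'
    | cons x xs => exact ⟨x, xs, rfl⟩
  have hrest2 : rest2 = [] := by
    rw [hq, hq1] at hlen'; simpa using hlen'
  subst hq1 hrest2
  refine ⟨q0, q1, w1, w2, hq, ?_, fun x hx => (hsp1 x hx).1, fun x hx => (hsp2 x hx).1⟩
  rw [hkey, hq, modLast_pair]
  rfl

-- the '-'-handling of A's loop body, after the strip (proof-side only)
def gA (part : String) : List Int :=
  let p := PySem.Str.strip part
  if PySem.Str.isIn "-" p = true then
    PySem.List.pyRange (pvInt ((pvSplit p "-").getD 0 ""))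
                       (pvInt ((pvSplit p "-").getD 1 "") + 1) 1
  else
    [pvInt p]

-- A's loop body with the strip removed, still on the FULL '-'-split (proof-side only)
def pvExpandS (token : String) : List Int :=
  if PySem.Str.isIn "-" token = true then
    PySem.List.pyRange (pvInt ((pvSplit token "-").getD 0 ""))
                       (pvInt ((pvSplit token "-").getD 1 "") + 1) 1
  else
    [pvInt token]

lemma pvInt_toList (s t : String) (h : PySem.Int.ofChars? s.toList = PySem.Int.ofChars? t.toList) :
    pvInt s = pvInt t := by
  rw [pvInt, pvInt, PySem.Int.ofStr?.eq_1, PySem.Int.ofStr?.eq_1, h]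

lemma part_core (part : String) (hd : ∀ c ∈ part.toList, pvDomChar c = true)
    (hok : if PySem.Str.isIn "-" part = true then
        (pvSplit part "-").length = 2 ∧
        (PySem.Int.ofStr? ((pvSplit part "-").getD 0 "")).isSome = true ∧
        (PySem.Int.ofStr? ((pvSplit part "-").getD 1 "")).isSome = true
      else (PySem.Int.ofStr? part).isSome = true) :
    gA part = pvExpandS part := by
  rw [gA, pvExpandS]
  simp only [isIn_strip part hd]
  by_cases hin : PySem.Str.isIn "-" part = true
  · rw [if_pos hin] at hok ⊢
    rw [if_pos hin]
    have hlen2 : (split1 '-' part.toList).length = 2 := by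
      rw [← pvSplit_toList part '-' "-" rfl]
      simpa using hok.1
    obtain ⟨q0, q1, u, v, hq, hp, hu, hv⟩ := split_strip_pair part.toList hd hlen2
    have hA0 : ((pvSplit (PySem.Str.strip part) "-").getD 0 "").toList = q0 := by
      rw [toList_getD, pvSplit_toList _ '-' "-" rfl, PySem.Str.toList_strip, hq]; rfl
    have hA1 : ((pvSplit (PySem.Str.strip part) "-").getD 1 "").toList = q1 := by
      rw [toList_getD, pvSplit_toList _ '-' "-" rfl, PySem.Str.toList_strip, hq]; rfl
    have hB0 : ((pvSplit part "-").getD 0 "").toList = u ++ q0 := by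
      rw [toList_getD, pvSplit_toList _ '-' "-" rfl, hp]; rfl
    have hB1 : ((pvSplit part "-").getD 1 "").toList = q1 ++ v := by
      rw [toList_getD, pvSplit_toList _ '-' "-" rfl, hp]; rfl
    have e0 : pvInt ((pvSplit (PySem.Str.strip part) "-").getD 0 "")
        = pvInt ((pvSplit part "-").getD 0 "") := by
      apply pvInt_toList
      rw [hA0, hB0, ofChars_ws_left u q0 hu]
    have e1 : pvInt ((pvSplit (PySem.Str.strip part) "-").getD 1 "")
        = pvInt ((pvSplit part "-").getD 1 "") := by
      apply pvInt_toList
      rw [hA1, hB1, ofChars_ws_right v q1 hv]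
    rw [e0, e1]
  · rw [if_neg hin]
    rw [if_neg hin]
    rw [pvInt_strip part hd]

-- ===== bridging the recursive B to the full comma split =====

lemma part1_no_occ (c : Char) (l : List Char) (h : c ∉ l) : part1 c l = [l] := by
  induction l with
  | nil => rfl
  | cons a rest ih =>
    rw [part1, if_neg (by simp at h; exact Ne.symm h.1), ih (by simp at h; exact h.2)]
    rfl

lemma part1_yes (c : Char) (l : List Char) (h : c ∈ l) : ∃ b a, part1 c l = [b, a] := by
  induction l with
  | nil => simp at h
  | cons x rest ih =>
    by_cases hxc : x = c
    · exact ⟨[], rest, by rw [part1, if_pos hxc]⟩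
    · have hcr : c ∈ rest := by
        rcases List.mem_cons.mp h with rfl | hcr
        · exact absurd rfl hxc
        · exact hcr
      obtain ⟨b, a, hba⟩ := ih hcr
      exact ⟨x :: b, a, by rw [part1, if_neg hxc, hba, List.modifyHead_cons]⟩

lemma split1_single (c : Char) (l : List Char) : ∀ x, split1 c l = [x] → x = l := by
  induction l with
  | nil => intro x h; simpa [split1, mySplit] using h.symm
  | cons a rest ih =>
    intro x h
    rw [split1_cons] at h
    by_cases hac : a = c
    · rw [if_pos hac] at h
      exact absurd (List.cons_eq_cons.mp h).2 (split1_ne_nil c rest)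
    · rw [if_neg hac] at h
      cases hs : split1 c rest with
      | nil => exact absurd hs (split1_ne_nil c rest)
      | cons y ys =>
        rw [hs, List.modifyHead_cons] at h
        obtain ⟨h1, h2⟩ := List.cons_eq_cons.mp h
        have : y = rest := ih y (by rw [hs, h2])
        rw [← h1, this]

lemma split1_decomp (c : Char) (b a : List Char) (hnb : c ∉ b) :
    split1 c (b ++ c :: a) = b :: split1 c a := by
  rw [split1_prefix c b _ hnb, split1_cons, if_pos rfl, List.modifyHead_cons, List.append_nil]

lemma map_toList_inj (L M : List String) (h : L.map String.toList = M.map String.toList) :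
    L = M := by
  induction L generalizing M with
  | nil => cases M <;> simp_all
  | cons x xs ih =>
    cases M with
    | nil => simp at h
    | cons y ys =>
      simp only [List.map_cons, List.cons.injEq] at h
      rw [String.toList_inj.mp h.1, ih ys h.2]

-- under Pre_'s per-part condition the maxsplit=1 expander agrees with the full-split one
lemma expandS_eq_expand1 (part : String)
    (hlen : PySem.Str.isIn "-" part = true → (pvSplit part "-").length = 2) :
    pvExpandS part = pvExpand1 part := by
  rw [pvExpandS, pvExpand1]
  by_cases hin : PySem.Str.isIn "-" part = true
  · rw [if_pos hin, if_pos hin]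
    have hmem : ('-' : Char) ∈ part.toList := by
      have : PySem.Str.isIn "-" part = PySem.Chars.isIn ['-'] part.toList := by
        rw [PySem.Str.isIn]; rfl
      exact (isIn_single '-' part.toList).mp (by rw [← this]; exact hin)
    obtain ⟨b, a, hba⟩ := part1_yes '-' part.toList hmem
    obtain ⟨hdec, hnb⟩ := part1_two '-' part.toList b a hba
    have hsplit : split1 '-' part.toList = b :: split1 '-' a := by
      rw [hdec, split1_decomp '-' b a hnb]
    have hlen2 : (split1 '-' part.toList).length = 2 := by
      rw [← pvSplit_toList part '-' "-" rfl]
      simpa using hlen hin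
    obtain ⟨x, hx⟩ : ∃ x, split1 '-' a = [x] := by
      rw [hsplit] at hlen2
      cases hs : split1 '-' a with
      | nil => exact absurd hs (split1_ne_nil '-' a)
      | cons y ys =>
        rw [hs] at hlen2
        have hys : ys = [] := by simpa using hlen2
        subst hys
        exact ⟨y, rfl⟩
    have hxa : x = a := split1_single '-' a x hx
    have hfull : split1 '-' part.toList = [b, a] := by rw [hsplit, hx, hxa]
    have h0 : ((pvSplit part "-").getD 0 "").toList = ((pvSplitMax part "-" 1).getD 0 "").toList := by
      rw [toList_getD, toList_getD, pvSplit_toList part '-' "-" rfl,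
        pvSplitMax_toList part '-' "-" rfl, hfull, hba]
    have h1 : ((pvSplit part "-").getD 1 "").toList = ((pvSplitMax part "-" 1).getD 1 "").toList := by
      rw [toList_getD, toList_getD, pvSplit_toList part '-' "-" rfl,
        pvSplitMax_toList part '-' "-" rfl, hfull, hba]
    rw [show pvInt ((pvSplit part "-").getD 0 "") = pvInt ((pvSplitMax part "-" 1).getD 0 "")
      from pvInt_toList _ _ (by rw [h0]),
      show pvInt ((pvSplit part "-").getD 1 "") = pvInt ((pvSplitMax part "-" 1).getD 1 "")
      from pvInt_toList _ _ (by rw [h1])]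
  · rw [if_neg hin, if_neg hin]

lemma split_no_comma (s : String) (hnc : (',' : Char) ∉ s.toList) : pvSplit s "," = [s] := by
  have hmap : (pvSplit s ",").map String.toList = [s.toList] := by
    rw [pvSplit_toList s ',' "," rfl, split1_no_occ ',' s.toList hnc]
  exact map_toList_inj _ _ (by rw [hmap]; rfl)

lemma yearsRec_flat (n : Nat) : ∀ s : String, s.toList.length ≤ n →
    yearsRec s = (pvSplit s ",").flatMap pvExpand1 := by
  induction n with
  | zero =>
    intro s hlen
    have hnil : s.toList = [] := List.length_eq_zero_iff.mp (Nat.le_zero.mp hlen)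
    have hnc : (',' : Char) ∉ s.toList := by rw [hnil]; simp
    have hshape : (pvSplitMax s "," 1).map String.toList = [s.toList] := by
      rw [pvSplitMax_toList s ',' "," rfl, part1_no_occ ',' s.toList hnc]
    have hone : pvSplitMax s "," 1 = [s] := map_toList_inj _ _ (by rw [hshape]; rfl)
    rw [yearsRec, dif_neg (by rw [hone]; simp), hone, split_no_comma s hnc]
    simp
  | succ n ih =>
    intro s hlen
    by_cases hc : (',' : Char) ∈ s.toList
    · obtain ⟨b, a, hba⟩ := part1_yes ',' s.toList hc
      obtain ⟨hdec, hnb⟩ := part1_two ',' s.toList b a hba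
      have hshape : (pvSplitMax s "," 1).map String.toList = [b, a] := by
        rw [pvSplitMax_toList s ',' "," rfl, hba]
      obtain ⟨sb, sa, hsbsa⟩ : ∃ sb sa, pvSplitMax s "," 1 = [sb, sa] := by
        cases hv : pvSplitMax s "," 1 with
        | nil => rw [hv] at hshape; simp at hshape
        | cons x xs =>
          cases xs with
          | nil => rw [hv] at hshape; simp at hshape
          | cons y ys =>
            cases ys with
            | nil => exact ⟨x, y, rfl⟩
            | cons z zs => rw [hv] at hshape; simp at hshape
      rw [hsbsa] at hshape
      simp only [List.map_cons, List.map_nil, List.cons.injEq, and_true] at hshape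
      obtain ⟨hsb, hsa⟩ := hshape
      have hsplit : pvSplit s "," = sb :: pvSplit sa "," := by
        apply map_toList_inj
        rw [pvSplit_toList s ',' "," rfl, hdec, split1_decomp ',' b a hnb, List.map_cons,
          pvSplit_toList sa ',' "," rfl, hsb, hsa]
      have hlt : sa.toList.length ≤ n := by
        have : a.length < s.toList.length := by
          rw [hdec, List.length_append, List.length_cons]; omega
        rw [hsa]; omega
      rw [yearsRec, dif_pos (by rw [hsbsa]; rfl), hsbsa]
      show pvExpand1 sb ++ yearsRec sa = _
      rw [ih sa hlt, hsplit, List.flatMap_cons]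
    · have hshape : (pvSplitMax s "," 1).map String.toList = [s.toList] := by
        rw [pvSplitMax_toList s ',' "," rfl, part1_no_occ ',' s.toList hc]
      have hone : pvSplitMax s "," 1 = [s] := map_toList_inj _ _ (by rw [hshape]; rfl)
      rw [yearsRec, dif_neg (by rw [hone]; simp), hone, split_no_comma s hc]
      simp

set_option maxHeartbeats 2000000 in
theorem main_thm (s : String) (hdom : pvDomStr s = true)
    (hpre : s = "" ∨ PySem.Str.lower s = "all" ∨ PySem.Str.lower s = "a" ∨
      ∀ part ∈ pvSplit s ",",
        if PySem.Str.isIn "-" part = true then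
          (pvSplit part "-").length = 2 ∧
          (PySem.Int.ofStr? ((pvSplit part "-").getD 0 "")).isSome = true ∧
          (PySem.Int.ofStr? ((pvSplit part "-").getD 1 "")).isSome = true
        else (PySem.Int.ofStr? part).isSome = true) :
    parse_year_input s = parse_year_input_alt s := by
  by_cases hg : s = "" ∨ PySem.Str.lower s = "all" ∨ PySem.Str.lower s = "a"
  · rw [parse_year_input, parse_year_input_alt, if_pos hg, if_pos hg]
  · rw [parse_year_input, parse_year_input_alt, if_neg hg, if_neg hg]
    have h4 : ∀ part ∈ pvSplit s ",",
        if PySem.Str.isIn "-" part = true then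
          (pvSplit part "-").length = 2 ∧
          (PySem.Int.ofStr? ((pvSplit part "-").getD 0 "")).isSome = true ∧
          (PySem.Int.ofStr? ((pvSplit part "-").getD 1 "")).isSome = true
        else (PySem.Int.ofStr? part).isSome = true := by
      rcases hpre with h | h | h | h
      · exact absurd (Or.inl h) hg
      · exact absurd (Or.inr (Or.inl h)) hg
      · exact absurd (Or.inr (Or.inr h)) hg
      · exact h
    have hdomL : ∀ c ∈ s.toList, pvDomChar c = true := by
      simpa [pvDomStr, List.all_eq_true] using hdom
    have hPartDom : ∀ part ∈ pvSplit s ",", ∀ c ∈ part.toList, pvDomChar c = true := by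
      intro part hp c hcp
      have : part.toList ∈ split1 ',' s.toList := by
        rw [← pvSplit_toList s ',' "," rfl]
        exact List.mem_map_of_mem hp
      exact hdomL c (mem_split1 ',' s.toList part.toList this c hcp)
    have hflat : yearsRec s = (pvSplit s ",").flatMap pvExpand1 :=
      yearsRec_flat s.toList.length s (le_refl _)
    have hflatS : (pvSplit s ",").flatMap pvExpandS = (pvSplit s ",").flatMap pvExpand1 := by
      rw [List.flatMap_def, List.flatMap_def]
      congr 1
      apply List.map_congr_left
      intro part hp
      apply expandS_eq_expand1
      intro hin
      have := h4 part hp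
      rw [if_pos hin] at this
      exact this.1
    by_cases hcm : PySem.Str.isIn "," s = true
    · rw [if_pos hcm]
      have hbody : (fun (years : List Int) (part : String) =>
          let p := PySem.Str.strip part
          if PySem.Str.isIn "-" p = true then
            years ++ PySem.List.pyRange (pvInt ((pvSplit p "-").getD 0 ""))
                                        (pvInt ((pvSplit p "-").getD 1 "") + 1) 1
          else
            years ++ [pvInt p]) = fun years part => years ++ gA part := by
        funext years part
        simp only [gA]
        by_cases h : PySem.Str.isIn "-" (PySem.Str.strip part) = true
        · rw [if_pos h, if_pos h]
        · rw [if_neg h, if_neg h]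
      rw [hbody, PySem.List.foldl_append_eq_flatMap gA (pvSplit s ",") []]
      rw [List.nil_append]
      congr 1
      rw [hflat, ← hflatS]
      rw [List.flatMap_def, List.flatMap_def]
      congr 1
      apply List.map_congr_left
      intro part hp
      exact part_core part (hPartDom part hp) (h4 part hp)
    · rw [if_neg hcm]
      have hnc : (',' : Char) ∉ s.toList := by
        intro hmem
        have : PySem.Str.isIn "," s = PySem.Chars.isIn [','] s.toList := by
          rw [PySem.Str.isIn]; rfl
        rw [this, (isIn_single ',' s.toList).mpr hmem] at hcm
        exact hcm rfl
      have hparts : pvSplit s "," = [s] := split_no_comma s hnc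
      have hys : yearsRec s = pvExpand1 s := by
        rw [hflat, hparts]; simp
      have hysS : yearsRec s = pvExpandS s := by
        rw [hys, ← expandS_eq_expand1 s]
        intro hin
        have := h4 s (hparts ▸ List.mem_cons_self)
        rw [if_pos hin] at this
        exact this.1
      rw [hysS]
      have hok := h4 s (hparts ▸ List.mem_cons_self)
      by_cases hds : PySem.Str.isIn "-" s = true
      · rw [if_pos hds, pvExpandS, if_pos hds]
        rw [if_pos hds] at hok
        have hlen2 : (split1 '-' s.toList).length = 2 := by
          rw [← pvSplit_toList s '-' "-" rfl]
          simpa using hok.1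
        have hpieceDom : ∀ i, i < 2 → ∀ c ∈ ((pvSplit s "-").getD i "").toList, pvDomChar c = true := by
          intro i hi c hcp
          rw [toList_getD, pvSplit_toList s '-' "-" rfl] at hcp
          have hmem : (split1 '-' s.toList).getD i [] ∈ split1 '-' s.toList := by
            rw [List.getD_eq_getElem _ [] (by omega : i < (split1 '-' s.toList).length)]
            exact List.getElem_mem _
          exact hdomL c (mem_split1 '-' s.toList _ hmem c hcp)
        rw [pvInt_strip _ (hpieceDom 0 (by omega)), pvInt_strip _ (hpieceDom 1 (by omega))]
      · rw [if_neg hds, pvExpandS, if_neg hds, pvInt_strip s hdomL]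

-- ===== VERDICT (by name: the statement is the Claim_ definition above) =====
theorem parse_year_input_spec : Claim_equal_parse_year_input := by
  intro year_input hdom hpre
  unfold Spec_parse_year_input
  unfold Dom_parse_year_input at hdom
  unfold Pre_parse_year_input at hpre
  exact main_thm year_input hdom hpre
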